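-- pv_equiv track=rewrite | github.com/first-muchacho/test_VISTA | python_tasks/task3.py | amount_balls
-- ===== SOURCE A (Python) =====
-- def amount_balls(n: int):
--     blue = 1
--     red = 0
--     while n > 0:
--         if red == 0:
--             red = 5
--             n -= 1
--         else:
--             blue = red + blue
--             red *= 2
--             n -= 1
--     return f'Сумма шариков на заданной итерации: {red + blue}'
-- ===== SOURCE B (Python) =====
-- def amount_balls(n: int):
--     total = 1 if n <= 0 else 5 * pow(2, n) - 4
--     return f'Сумма шариков на заданной итерации: {total}'
-- ===== Notes on version B (the rewrite author's own statement) =====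
-- stated objective: faster
-- what changed: Replaced the O(n) doubling loop with the closed form total = 5*2^n - 4 computed by built-in fast exponentiation (total = 1 for n <= 0).
import Mathlib
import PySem

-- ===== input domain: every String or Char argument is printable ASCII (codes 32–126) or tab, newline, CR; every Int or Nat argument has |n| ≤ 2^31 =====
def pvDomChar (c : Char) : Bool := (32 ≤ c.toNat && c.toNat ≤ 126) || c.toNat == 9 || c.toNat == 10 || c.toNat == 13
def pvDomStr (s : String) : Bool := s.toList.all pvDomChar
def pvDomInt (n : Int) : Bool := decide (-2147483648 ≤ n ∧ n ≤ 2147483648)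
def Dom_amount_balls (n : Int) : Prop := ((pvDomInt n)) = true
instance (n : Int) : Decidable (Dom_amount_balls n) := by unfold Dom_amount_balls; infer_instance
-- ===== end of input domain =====

-- B replaces A's O(n) doubling loop with the closed form 5*2^n - 4 via fast exponentiation (objective: faster).

-- ===== PORT A =====
-- the while loop of A: state (blue, red), decrementing n
def amountLoop (n blue red : Int) : Int × Int :=
  if _h : n > 0 then
    if red == 0 then amountLoop (n - 1) blue 5
    else amountLoop (n - 1) (red + blue) (red * 2)
  else (blue, red)
termination_by n.toNat
decreasing_by all_goals omega

def amount_balls (n : Int) : String :=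
  let st := amountLoop n 1 0
  "Сумма шариков на заданной итерации: " ++ PySem.Int.toStr (st.2 + st.1)

-- ===== PORT B =====
def amount_balls_alt (n : Int) : String :=
  let total : Int := if n ≤ 0 then 1 else 5 * 2 ^ n.toNat - 4
  "Сумма шариков на заданной итерации: " ++ PySem.Int.toStr total

-- ===== PRECONDITION & SPEC =====
def Spec_amount_balls (n : Int) (out : String) : Prop := out = amount_balls_alt n
instance (n : Int) (out : String) : Decidable (Spec_amount_balls n out) := by unfold Spec_amount_balls; infer_instance

-- ===== CLAIM (what is proved, stated in full; the proofs are below) =====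
def Claim_equal_amount_balls : Prop := ∀ (n : Int), Dom_amount_balls n → Spec_amount_balls n (amount_balls n)

-- ===== LEMMAS AND PROOFS =====

-- the red ≠ 0 phase: closed-form state after k steps
theorem amountLoop_pos (k : Nat) (blue red : Int) (hr : 0 < red) :
    amountLoop (k : Int) blue red = (blue + red * (2 ^ k - 1), red * 2 ^ k) := by
  induction k generalizing blue red with
  | zero => simp [amountLoop]
  | succ k ih =>
      rw [amountLoop]
      have h1 : ((k + 1 : Nat) : Int) > 0 := by push_cast; omega
      have h2 : ((k + 1 : Nat) : Int) - 1 = (k : Int) := by push_cast; omega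
      rw [dif_pos h1, if_neg (by simp; omega), h2, ih (red + blue) (red * 2) (by omega)]
      simp only [Prod.mk.injEq]
      refine ⟨?_, ?_⟩ <;> (rw [pow_succ]; ring)

theorem amountLoop_sum (n : Int) (hn : 0 < n) :
    (amountLoop n 1 0).2 + (amountLoop n 1 0).1 = 5 * 2 ^ n.toNat - 4 := by
  rw [amountLoop, dif_pos hn, if_pos (by decide)]
  have hk : n - 1 = ((n - 1).toNat : Int) := by omega
  rw [hk, amountLoop_pos (n - 1).toNat 1 5 (by omega)]
  have : n.toNat = (n - 1).toNat + 1 := by omega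
  rw [this, pow_succ]
  ring

-- ===== VERDICT (by name: the statement is the Claim_ definition above) =====
theorem amount_balls_spec : Claim_equal_amount_balls := by
  intro n _
  unfold Spec_amount_balls amount_balls amount_balls_alt
  by_cases h : n ≤ 0
  · rw [amountLoop]
    simp [h, show ¬ n > 0 by omega]
  · simp only [h, if_false]
    rw [amountLoop_sum n (by omega)]
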